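-- pv_equiv track=rewrite | github.com/Ava4wonder/Avaclaw | apps/backend/app/tools/paper_to_code.py | _matches_any_prefix
-- ===== SOURCE A (Python) =====
-- def _matches_any_prefix(path: str, prefixes: list[str]) -> bool:
--     if not prefixes:
--         return True
--     normalized = path.replace("\\", "/").lstrip("./")
--     for prefix in prefixes:
--         p = prefix.replace("\\", "/").lstrip("./")
--         if not p:
--             continue
--         if normalized == p or normalized.startswith(f"{p}/"):
--             return True
--     return False
-- ===== SOURCE B (Python) =====
-- def _matches_any_prefix(path: str, prefixes: list[str]) -> bool:
--     if not prefixes: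
--         return True
--
--     def _norm(s):
--         return s.replace("\\", "/").lstrip("./")
--
--     targets = {q for q in map(_norm, prefixes) if q}
--     normalized = _norm(path)
--     candidates = set(
--         [normalized]
--         + [normalized[:i] for i, ch in enumerate(normalized) if ch == "/"]
--     )
--     return not targets.isdisjoint(candidates)
-- ===== Notes on version B (the rewrite author's own statement) =====
-- stated objective: alternative
-- what changed: A scans the prefixes one by one, testing equality/startswith against the normalized path with an early return; B instead builds the set of normalized nonempty prefixes and the set of slash-boundary ancestors of the normalized path, and answers by a single set intersection test.
import Mathlib
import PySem

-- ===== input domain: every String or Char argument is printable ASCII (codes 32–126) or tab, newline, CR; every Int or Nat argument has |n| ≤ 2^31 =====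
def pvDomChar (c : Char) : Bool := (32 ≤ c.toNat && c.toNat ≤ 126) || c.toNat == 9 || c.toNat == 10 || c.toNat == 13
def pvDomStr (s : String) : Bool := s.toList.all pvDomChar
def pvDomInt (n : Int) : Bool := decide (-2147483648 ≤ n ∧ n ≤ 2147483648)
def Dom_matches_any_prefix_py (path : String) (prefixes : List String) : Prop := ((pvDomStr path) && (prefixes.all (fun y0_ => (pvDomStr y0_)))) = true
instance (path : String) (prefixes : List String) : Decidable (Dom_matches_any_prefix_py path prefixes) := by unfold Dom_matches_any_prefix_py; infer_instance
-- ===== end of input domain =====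

-- B replaces A's per-prefix scan-with-early-return by a set of normalized prefixes intersected
-- with the set of slash-boundary ancestors of the normalized path (objective: alternative).

-- ===== PORT A =====
-- s.replace("\\", "/").lstrip("./"); lstrip("./") drops leading chars from the set {'.', '/'} — dropWhile is exact here
def pvNormA (s : List Char) : List Char :=
  (PySem.Chars.replace s ['\\'] ['/']).dropWhile (fun c => c == '.' || c == '/')

def pvLoopA (normalized : List Char) : List String → Bool
  | [] => false
  | pre :: rest =>
    let p := pvNormA pre.toList
    if p.isEmpty then pvLoopA normalized rest
    else if normalized == p || PySem.Chars.startswith normalized (p ++ ['/']) then true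
    else pvLoopA normalized rest

def matches_any_prefix_py (path : String) (prefixes : List String) : Bool :=
  if prefixes.isEmpty then true
  else pvLoopA (pvNormA path.toList) prefixes

-- ===== PORT B =====
def pvNormB (s : List Char) : List Char :=
  (PySem.Chars.replace s ['\\'] ['/']).dropWhile (fun c => c == '.' || c == '/')

def matches_any_prefix_py_alt (path : String) (prefixes : List String) : Bool :=
  if prefixes.isEmpty then true
  else
    let targets : PySem.Set (List Char) :=
      PySem.Set.ofList ((prefixes.map (fun p => pvNormB p.toList)).filter (fun q => !q.isEmpty))
    let normalized := pvNormB path.toList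
    let candidates : PySem.Set (List Char) :=
      PySem.Set.ofList (normalized ::
        ((PySem.List.enumerate normalized).filter (fun ic => ic.2 == '/')).map
          (fun ic => PySem.Chars.slice normalized none (some ic.1)))
    !(PySem.Set.isdisjoint targets candidates)

-- ===== PRECONDITION & SPEC =====
def Spec_matches_any_prefix_py (path : String) (prefixes : List String) (out : Bool) : Prop := out = matches_any_prefix_py_alt path prefixes
instance (path : String) (prefixes : List String) (out : Bool) : Decidable (Spec_matches_any_prefix_py path prefixes out) := by unfold Spec_matches_any_prefix_py; infer_instance

-- ===== CLAIM (what is proved, stated in full; the proofs are below) =====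
def Claim_equal_matches_any_prefix_py : Prop := ∀ (path : String) (prefixes : List String), Dom_matches_any_prefix_py path prefixes → Spec_matches_any_prefix_py path prefixes (matches_any_prefix_py path prefixes)

-- ===== LEMMAS AND PROOFS =====

theorem pvNormB_eq_pvNormA (s : List Char) : pvNormB s = pvNormA s := rfl

-- the candidate list of B holds exactly the strings A's per-prefix test accepts
theorem pv_mem_cand (n q : List Char) :
    q ∈ (n :: ((PySem.List.enumerate n).filter (fun ic => ic.2 == '/')).map
          (fun ic => PySem.Chars.slice n none (some ic.1)))
      ↔ (q = n ∨ q ++ ['/'] <+: n) := by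
  constructor
  · intro h
    rcases List.mem_cons.mp h with h | h
    · exact Or.inl h
    · right
      obtain ⟨⟨i, c⟩, hmem, hq⟩ := List.mem_map.mp h
      have hfil := List.mem_filter.mp hmem
      have hc : c = '/' := by simpa using hfil.2
      rw [PySem.List.enumerate_eq_zipIdx_map] at hfil
      obtain ⟨⟨c', k⟩, hzi, heq⟩ := List.mem_map.mp hfil.1
      simp only [Prod.mk.injEq] at heq
      obtain ⟨hi, hc'⟩ := heq
      have hk : n[k]? = some c' := by simpa using List.mem_zipIdx_iff_getElem?.mp hzi
      have hq' : q = n.take k := by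
        rw [← hq]
        simp only [PySem.Chars.slice_eq_listSlice]
        rw [PySem.List.slice_to n (b := i) (by omega)]
        congr 1
        omega
      have hk' : n[k]? = some '/' := by rw [hk, hc', hc]
      have : q ++ ['/'] = n.take (k + 1) := by
        rw [List.take_add_one, hk', hq']
        simp
      rw [this]
      exact List.take_prefix _ _
  · intro h
    rcases h with rfl | ⟨t, ht⟩
    · exact List.mem_cons_self
    · apply List.mem_cons_of_mem
      apply List.mem_map.mpr
      refine ⟨((q.length : Int), '/'), ?_, ?_⟩
      · apply List.mem_filter.mpr
        refine ⟨?_, by simp⟩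
        rw [PySem.List.enumerate_eq_zipIdx_map]
        apply List.mem_map.mpr
        refine ⟨('/', q.length), ?_, by simp⟩
        rw [List.mem_zipIdx_iff_getElem?]
        simp only
        rw [← ht, List.append_assoc]
        rw [List.getElem?_append_right (by simp)]
        simp
      · simp only [PySem.Chars.slice_eq_listSlice]
        rw [PySem.List.slice_to n (Int.natCast_nonneg q.length)]
        rw [← ht, List.append_assoc]
        simp

theorem pvLoopA_iff (n : List Char) (ps : List String) :
    pvLoopA n ps = true ↔
      ∃ pre ∈ ps, ¬(pvNormA pre.toList).isEmpty = true ∧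
        (n = pvNormA pre.toList ∨ (pvNormA pre.toList ++ ['/']) <+: n) := by
  induction ps with
  | nil => simp [pvLoopA]
  | cons a l ih =>
    simp only [pvLoopA]
    split_ifs with h1 h2
    · simp only [ih]
      constructor
      · rintro ⟨pre, hm, hp⟩; exact ⟨pre, List.mem_cons_of_mem _ hm, hp⟩
      · rintro ⟨pre, hm, hp⟩
        rcases List.mem_cons.mp hm with rfl | hm'
        · exact absurd h1 hp.1
        · exact ⟨pre, hm', hp⟩
    · constructor
      · intro _
        refine ⟨a, List.mem_cons_self, h1, ?_⟩
        rcases Bool.or_eq_true _ _ |>.mp h2 with h | h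
        · exact Or.inl (by simpa using h)
        · exact Or.inr ((PySem.Chars.startswith_iff _ _).mp h)
      · intro _; rfl
    · simp only [ih]
      constructor
      · rintro ⟨pre, hm, hp⟩; exact ⟨pre, List.mem_cons_of_mem _ hm, hp⟩
      · rintro ⟨pre, hm, hp⟩
        rcases List.mem_cons.mp hm with rfl | hm'
        · exfalso
          apply h2
          rcases hp.2 with h | h
          · simp [h]
          · simp [PySem.Chars.startswith_iff, h]
        · exact ⟨pre, hm', hp⟩

-- ===== VERDICT (by name: the statement is the Claim_ definition above) =====
theorem matches_any_prefix_py_spec : Claim_equal_matches_any_prefix_py := by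
  intro path prefixes _
  unfold Spec_matches_any_prefix_py matches_any_prefix_py matches_any_prefix_py_alt
  cases prefixes with
  | nil => rfl
  | cons a l =>
    simp only [List.isEmpty_cons, Bool.false_eq_true, if_false]
    rw [Bool.eq_iff_iff]
    rw [pvLoopA_iff]
    constructor
    · rintro ⟨pre, hm, hne, hmatch⟩
      simp only [Bool.not_eq_true', ← Bool.not_eq_true]
      intro hdis
      have := (PySem.Set.isdisjoint_iff _ _).mp hdis (pvNormA pre.toList)
      apply this
      · rw [PySem.Set.mem_ofList, List.mem_filter]
        refine ⟨List.mem_map.mpr ⟨pre, hm, (pvNormB_eq_pvNormA _)⟩, ?_⟩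
        simpa [pvNormB_eq_pvNormA] using hne
      · rw [PySem.Set.mem_ofList]
        simp only [pvNormB_eq_pvNormA]
        rw [pv_mem_cand]
        rcases hmatch with h | h
        · exact Or.inl h.symm
        · exact Or.inr h
    · intro hb
      rw [Bool.not_eq_true'] at hb
      have hnall : ¬ (∀ x ∈ PySem.Set.ofList (((a :: l).map (fun p => pvNormB p.toList)).filter (fun q => !q.isEmpty)),
          x ∉ PySem.Set.ofList ((pvNormB path.toList) ::
            ((PySem.List.enumerate (pvNormB path.toList)).filter (fun ic => ic.2 == '/')).map
              (fun ic => PySem.Chars.slice (pvNormB path.toList) none (some ic.1)))) := by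
        intro hall
        rw [← PySem.Set.isdisjoint_iff] at hall
        rw [hb] at hall
        exact Bool.false_ne_true hall
      push Not at hnall
      obtain ⟨x, hxt, hxc⟩ := hnall
      rw [PySem.Set.mem_ofList, List.mem_filter] at hxt
      obtain ⟨hxm, hxne⟩ := hxt
      obtain ⟨pre, hm, rfl⟩ := List.mem_map.mp hxm
      rw [PySem.Set.mem_ofList] at hxc
      simp only [pvNormB_eq_pvNormA] at hxc hxne ⊢
      rw [pv_mem_cand] at hxc
      refine ⟨pre, hm, by simpa using hxne, ?_⟩
      rcases hxc with h | h
      · exact Or.inl h.symm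
      · exact Or.inr h
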